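-- pv_equiv track=rewrite | github.com/mrpid12org/imageworks | src/imageworks/gui/pages/2_🎯_Models.py | update_extra_args
-- ===== SOURCE A (Python) =====
-- from typing import Dict, List, Any, Optional
--
-- def update_extra_args(
--     extra_args: List[str], updates: Dict[str, Optional[str]]
-- ) -> List[str]:
--     """Update extra_args list with new flag values.
--
--     - If value is None, removes the flag
--     - If flag exists, updates its value
--     - If flag doesn't exist, appends it
--     - Preserves unknown flags
--     """
--     result = []
--     skip_next = False
--     processed_flags = set()
--
--     i = 0
--     while i < len(extra_args):
--         if skip_next:
--             skip_next = False
--             i += 1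
--             continue
--
--         arg = extra_args[i]
--
--         # Handle --flag=value format
--         if "=" in arg and arg.startswith("--"):
--             flag_part, value_part = arg.split("=", 1)
--             flag_name = flag_part.lstrip("-")
--
--             if flag_name in updates:
--                 processed_flags.add(flag_name)
--                 # Update or remove
--                 if updates[flag_name] is not None:
--                     result.append(f"--{flag_name}={updates[flag_name]}")
--                 # else: skip (remove)
--             else:
--                 # Keep unknown flag
--                 result.append(arg)
--             i += 1
--             continue
--
--         # Handle --flag value format
--         if arg.startswith("--"):
--             flag_name = arg.lstrip("-")
--
--             if flag_name in updates:
--                 processed_flags.add(flag_name)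
--                 # Update or remove
--                 if updates[flag_name] is not None:
--                     result.append(f"--{flag_name}")
--                     result.append(updates[flag_name])
--                 # else: skip both flag and value
--                 if i + 1 < len(extra_args) and not extra_args[i + 1].startswith("--"):
--                     skip_next = True
--             else:
--                 # Keep unknown flag
--                 result.append(arg)
--         else:
--             # Keep non-flag args
--             result.append(arg)
--
--         i += 1
--
--     # Add new flags that weren't already present
--     for flag_name, value in updates.items():
--         if flag_name not in processed_flags and value is not None:
--             result.append(f"--{flag_name}")
--             result.append(value)
--
--     return result
-- ===== SOURCE B (Python) =====
-- def update_extra_args(extra_args, updates):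
--     """Two-pass rewrite: first group tokens into (kind, flag, orig, val) units,
--     then emit each unit per updates, finally append unseen flags."""
--     units = []
--     i = 0
--     n = len(extra_args)
--     while i < n:
--         tok = extra_args[i]
--         if tok.startswith("--") and "=" in tok:
--             units.append(("eq", tok.split("=", 1)[0].lstrip("-"), tok, None))
--             i += 1
--         elif tok.startswith("--"):
--             if i + 1 < n and not extra_args[i + 1].startswith("--"):
--                 units.append(("flag", tok.lstrip("-"), tok, extra_args[i + 1]))
--                 i += 2
--             else:
--                 units.append(("flag", tok.lstrip("-"), tok, None))
--                 i += 1
--         else: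
--             units.append(("raw", None, tok, None))
--             i += 1
--     result = []
--     processed = set()
--     for kind, flag, orig, val in units:
--         if kind == "raw":
--             result.append(orig)
--         elif flag in updates:
--             processed.add(flag)
--             new = updates[flag]
--             if new is not None:
--                 if kind == "eq":
--                     result.append(f"--{flag}={new}")
--                 else:
--                     result.append(f"--{flag}")
--                     result.append(new)
--         else:
--             result.append(orig)
--             if val is not None:
--                 result.append(val)
--     for flag, value in updates.items():
--         if flag not in processed and value is not None:
--             result.append(f"--{flag}")
--             result.append(value)
--     return result
-- ===== Notes on version B (the rewrite author's own statement) =====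
-- stated objective: alternative
-- what changed: Replaces A's single-pass while-loop with skip_next flag state by a two-pass decomposition: first tokenise extra_args into an explicit list of units (--flag=value / --flag [value] / raw), then emit each unit against updates and append the unseen flags.
import Mathlib
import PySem

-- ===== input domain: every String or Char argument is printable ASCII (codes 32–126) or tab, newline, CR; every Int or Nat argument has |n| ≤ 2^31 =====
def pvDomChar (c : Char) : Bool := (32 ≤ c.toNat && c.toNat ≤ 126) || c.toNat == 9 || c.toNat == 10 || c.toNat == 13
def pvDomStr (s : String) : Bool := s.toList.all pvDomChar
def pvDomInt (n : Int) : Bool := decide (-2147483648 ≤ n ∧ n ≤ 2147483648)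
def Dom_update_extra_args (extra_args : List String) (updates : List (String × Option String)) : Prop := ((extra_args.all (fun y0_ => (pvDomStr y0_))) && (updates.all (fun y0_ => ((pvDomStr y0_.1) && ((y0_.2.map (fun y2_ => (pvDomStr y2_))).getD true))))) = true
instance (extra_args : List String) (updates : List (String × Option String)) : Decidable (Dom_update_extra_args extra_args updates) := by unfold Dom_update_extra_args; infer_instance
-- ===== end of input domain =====

-- B replaces A's inline skip_next state machine by a two-pass decomposition (tokenise into flag/value units, then emit); objective: alternative structure, same cost.


-- shared token-level helpers (identical one-liners in both Pythons)
-- Python s.lstrip("-"): drop leading '-' characters (exact)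
def pyLstripDash (s : String) : String := String.ofList (s.toList.dropWhile (fun c => c == '-'))
-- Python tok.split("=", 1)[0]: prefix before the first '=' (exact when '=' occurs; guarded by "=" in tok)
def eqFlagName (s : String) : String := pyLstripDash (String.ofList (s.toList.takeWhile (fun c => c ≠ '=')))

-- append the updates entries whose flag was not processed and whose value is not None (A's and B's final loop, identical in both Pythons)
def appendNew (updates : List (String × Option String)) (proc : PySem.Set String) (res : List String) : List String :=
  (PySem.Dict.mk updates).items.foldl (fun r kv =>
    if !(PySem.Set.contains proc kv.1) then
      match kv.2 with
      | some v => r ++ ["--" ++ kv.1, v]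
      | none => r
    else r) res

-- ===== PORT A =====
-- A's while-loop with skip_next, result accumulator and processed set
def loopA (d : PySem.Dict String (Option String)) : List String → Bool → List String → PySem.Set String → List String × PySem.Set String
  | [], _, res, proc => (res, proc)
  | a :: rest, skip, res, proc =>
    if skip then loopA d rest false res proc
    else if PySem.Str.isIn "=" a && PySem.Str.startswith a "--" then
      let flag := eqFlagName a
      if PySem.Dict.contains d flag then
        let res' := match PySem.Dict.getD d flag none with
          | some v => res ++ ["--" ++ flag ++ "=" ++ v]
          | none => res
        loopA d rest false res' (PySem.Set.add proc flag)
      else loopA d rest false (res ++ [a]) proc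
    else if PySem.Str.startswith a "--" then
      let flag := pyLstripDash a
      if PySem.Dict.contains d flag then
        let res' := match PySem.Dict.getD d flag none with
          | some v => res ++ ["--" ++ flag, v]
          | none => res
        let skip' := match rest with
          | b :: _ => !(PySem.Str.startswith b "--")
          | [] => false
        loopA d rest skip' res' (PySem.Set.add proc flag)
      else loopA d rest false (res ++ [a]) proc
    else loopA d rest false (res ++ [a]) proc

def update_extra_args (extra_args : List String) (updates : List (String × Option String)) : List String :=
  let p := loopA (PySem.Dict.mk updates) extra_args false [] PySem.Set.empty
  appendNew updates p.2 p.1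

-- ===== PORT B =====
-- a unit of B's first pass: ("eq", flag, orig), ("flag", flag, orig, optional value) or a raw token
inductive PvUnit : Type
  | eqTok : String → String → PvUnit
  | flagTok : String → String → Option String → PvUnit
  | raw : String → PvUnit
deriving DecidableEq, Repr

-- B's first pass: group tokens into units
def unitsOf : List String → List PvUnit
  | [] => []
  | a :: rest =>
    if PySem.Str.startswith a "--" && PySem.Str.isIn "=" a then
      .eqTok (eqFlagName a) a :: unitsOf rest
    else if PySem.Str.startswith a "--" then
      match rest with
      | b :: rest' =>
        if !(PySem.Str.startswith b "--") then .flagTok (pyLstripDash a) a (some b) :: unitsOf rest'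
        else .flagTok (pyLstripDash a) a none :: unitsOf (b :: rest')
      | [] => .flagTok (pyLstripDash a) a none :: unitsOf []
    else .raw a :: unitsOf rest
termination_by xs => xs.length
decreasing_by all_goals simp

-- B's second pass: emit one unit
def emitUnit (d : PySem.Dict String (Option String)) (u : PvUnit) (proc : PySem.Set String) : List String × PySem.Set String :=
  match u with
  | .raw t => ([t], proc)
  | .eqTok flag orig =>
    if PySem.Dict.contains d flag then
      (match PySem.Dict.getD d flag none with
        | some v => ["--" ++ flag ++ "=" ++ v]
        | none => [], PySem.Set.add proc flag)
    else ([orig], proc)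
  | .flagTok flag orig val =>
    if PySem.Dict.contains d flag then
      (match PySem.Dict.getD d flag none with
        | some v => ["--" ++ flag, v]
        | none => [], PySem.Set.add proc flag)
    else
      (match val with
        | some b => [orig, b]
        | none => [orig], proc)

def processUnits (d : PySem.Dict String (Option String)) : List PvUnit → PySem.Set String → List String × PySem.Set String
  | [], proc => ([], proc)
  | u :: us, proc =>
    let p := emitUnit d u proc
    let q := processUnits d us p.2
    (p.1 ++ q.1, q.2)

def update_extra_args_alt (extra_args : List String) (updates : List (String × Option String)) : List String :=
  let p := processUnits (PySem.Dict.mk updates) (unitsOf extra_args) PySem.Set.empty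
  appendNew updates p.2 p.1

-- ===== PRECONDITION & SPEC =====
def Spec_update_extra_args (extra_args : List String) (updates : List (String × Option String)) (out : List String) : Prop := out = update_extra_args_alt extra_args updates
instance (extra_args : List String) (updates : List (String × Option String)) (out : List String) : Decidable (Spec_update_extra_args extra_args updates out) := by unfold Spec_update_extra_args; infer_instance

-- ===== CLAIM (what is proved, stated in full; the proofs are below) =====
def Claim_equal_update_extra_args : Prop := ∀ (extra_args : List String) (updates : List (String × Option String)), Dom_update_extra_args extra_args updates → Spec_update_extra_args extra_args updates (update_extra_args extra_args updates)

-- ===== LEMMAS AND PROOFS =====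

-- A's loop (started unskipped) computes exactly B's two passes, prefixed by the accumulator
theorem loopA_eq_processUnits (d : PySem.Dict String (Option String)) :
    ∀ (xs : List String) (res : List String) (proc : PySem.Set String),
      loopA d xs false res proc =
        (res ++ (processUnits d (unitsOf xs) proc).1, (processUnits d (unitsOf xs) proc).2) := by
  intro xs
  induction xs using unitsOf.induct with
  | case1 => intro res proc; simp [loopA, unitsOf, processUnits]
  | case2 a rest h ih =>
    intro res proc
    simp only [Bool.and_eq_true] at h
    obtain ⟨h1, h2⟩ := h
    rw [unitsOf.eq_def, loopA.eq_def]
    simp only [h1, h2, Bool.and_self, if_true, Bool.false_eq_true, if_false, PySem.Str.startswith_eq, PySem.Str.isIn_eq, Bool.and_true, Bool.true_and, processUnits, emitUnit]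
    split
    · cases hv : d.getD (eqFlagName a) none <;> simp [hv, ih]
    · simp [ih]
  | case3 a hne hsw b rest' hb ih =>
    intro res proc
    have hni : PySem.Str.isIn "=" a = false := by
      cases hx : PySem.Str.isIn "=" a <;> simp_all
    have hb' : PySem.Str.startswith b "--" = false := by simpa using hb
    have hb2 : PySem.Chars.startswith b.toList ['-', '-'] = false := by simpa using hb'
    rw [unitsOf.eq_def, loopA.eq_def]
    simp only [hsw, hni, hb', Bool.and_false, Bool.false_and, Bool.and_true, Bool.true_and,
      Bool.false_eq_true, if_false, if_true, Bool.not_false, processUnits, emitUnit]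
    split
    · cases hv : d.getD (pyLstripDash a) none <;>
        · rw [loopA.eq_def]
          simp [hv, ih]
    · rw [loopA.eq_def]
      simp [hb2, ih]
  | case4 a hne hsw b rest' hb ih =>
    intro res proc
    have hni : PySem.Str.isIn "=" a = false := by
      cases hx : PySem.Str.isIn "=" a <;> simp_all
    have hb' : PySem.Str.startswith b "--" = true := by simpa using hb
    rw [unitsOf.eq_def, loopA.eq_def]
    simp only [hsw, hni, hb', Bool.and_false, Bool.false_and, Bool.not_true,
      Bool.false_eq_true, if_false, if_true, processUnits, emitUnit]
    split
    · cases hv : d.getD (pyLstripDash a) none <;> simp [hv, ih]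
    · simp [ih]
  | case5 a hne hsw =>
    intro res proc
    have hni : PySem.Str.isIn "=" a = false := by
      cases hx : PySem.Str.isIn "=" a <;> simp_all
    rw [unitsOf.eq_def, loopA.eq_def]
    simp only [hsw, hni, Bool.and_false, Bool.false_and,
      Bool.false_eq_true, if_false, if_true, processUnits, emitUnit]
    split
    · cases hv : d.getD (pyLstripDash a) none <;> simp [hv, loopA, unitsOf, processUnits]
    · simp [loopA, unitsOf, processUnits]
  | case6 a rest hne hsw ih =>
    intro res proc
    have hsw' : PySem.Str.startswith a "--" = false := by
      cases hx : PySem.Str.startswith a "--" <;> simp_all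
    rw [unitsOf.eq_def, loopA.eq_def]
    simp only [hsw', Bool.and_false, Bool.false_and, Bool.and_true,
      Bool.false_eq_true, if_false, processUnits, emitUnit]
    simp [ih]

-- ===== VERDICT (by name: the statement is the Claim_ definition above) =====
theorem update_extra_args_spec : Claim_equal_update_extra_args := by
  intro extra_args updates _
  unfold Spec_update_extra_args update_extra_args update_extra_args_alt
  rw [loopA_eq_processUnits]
  simp
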